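-- pv_equiv track=rewrite | github.com/mnemonicsloth/genomics_local | construct_synteny3_preserve_sequences.py | matchReplichores
-- ===== SOURCE A (Python) =====
-- def matchReplichores(ref, test):
--     refL = { geneMarker for (geneMarker, (start, end)) in ref[0]}
--     refR = { geneMarker for (geneMarker, (start, end)) in ref[1]}
--
--     testL = { geneMarker for (geneMarker, (start, end)) in test[0]}
--     testR = { geneMarker for (geneMarker, (start, end)) in test[1]}
--
--     LL = refL.intersection(testL)
--     LR = refL.intersection(testR)
--     RL = refR.intersection(testL)
--     RR = refR.intersection(testR)
--
--     return list(map(len, [LL, LR, RL, RR]))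
-- ===== SOURCE B (Python) =====
-- def matchReplichores(ref, test):
--     flags = {}
--     for half, bit in ((ref[0], 1), (ref[1], 2), (test[0], 4), (test[1], 8)):
--         for geneMarker, (start, end) in half:
--             flags[geneMarker] = flags.get(geneMarker, 0) | bit
--     LL = LR = RL = RR = 0
--     for f in flags.values():
--         if f & 1:
--             if f & 4:
--                 LL += 1
--             if f & 8:
--                 LR += 1
--         if f & 2:
--             if f & 4:
--                 RL += 1
--             if f & 8:
--                 RR += 1
--     return [LL, LR, RL, RR]
-- ===== Notes on version B (the rewrite author's own statement) =====
-- stated objective: alternative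
-- what changed: Instead of building four marker sets and intersecting them pairwise, B makes one pass over the four halves building a single dict mapping each marker to a bitmask of the halves containing it, then tallies the four overlap counters in one pass over that dict's values.
import Mathlib
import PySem

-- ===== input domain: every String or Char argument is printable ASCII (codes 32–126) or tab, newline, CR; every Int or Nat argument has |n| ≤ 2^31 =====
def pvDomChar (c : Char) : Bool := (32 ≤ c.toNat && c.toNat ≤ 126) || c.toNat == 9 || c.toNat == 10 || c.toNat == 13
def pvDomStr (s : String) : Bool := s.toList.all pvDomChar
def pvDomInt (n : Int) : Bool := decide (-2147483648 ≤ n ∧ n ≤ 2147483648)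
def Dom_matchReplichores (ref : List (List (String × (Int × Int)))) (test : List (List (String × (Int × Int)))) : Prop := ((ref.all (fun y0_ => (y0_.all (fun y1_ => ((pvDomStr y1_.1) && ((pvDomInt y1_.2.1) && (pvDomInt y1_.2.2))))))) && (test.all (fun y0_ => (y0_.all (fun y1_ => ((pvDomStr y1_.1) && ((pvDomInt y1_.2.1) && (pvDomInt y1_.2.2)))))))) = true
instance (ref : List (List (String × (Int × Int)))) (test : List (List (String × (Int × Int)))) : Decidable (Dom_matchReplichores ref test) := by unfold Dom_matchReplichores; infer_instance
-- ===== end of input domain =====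

-- B replaces A's four marker sets + four pairwise intersections by ONE dict mapping each marker to a
-- bitmask of the halves containing it, tallied in a single pass (alternative decomposition, same cost).

-- ===== PORT A =====
def matchReplichores (ref : List (List (String × (Int × Int)))) (test : List (List (String × (Int × Int)))) : List Int :=
  match PySem.List.pyGet? ref 0, PySem.List.pyGet? ref 1, PySem.List.pyGet? test 0, PySem.List.pyGet? test 1 with
  | some ref0, some ref1, some test0, some test1 =>
    let refL : PySem.Set String := PySem.Set.ofList (ref0.map (fun p => p.1))
    let refR : PySem.Set String := PySem.Set.ofList (ref1.map (fun p => p.1))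
    let testL : PySem.Set String := PySem.Set.ofList (test0.map (fun p => p.1))
    let testR : PySem.Set String := PySem.Set.ofList (test1.map (fun p => p.1))
    let LL := PySem.Set.inter refL testL
    let LR := PySem.Set.inter refL testR
    let RL := PySem.Set.inter refR testL
    let RR := PySem.Set.inter refR testR
    [PySem.Set.len LL, PySem.Set.len LR, PySem.Set.len RL, PySem.Set.len RR]
  | _, _, _, _ => []   -- unreachable under Pre_ (Python raises IndexError)

-- ===== PORT B =====
-- 'for geneMarker, _ in half: flags[geneMarker] = flags.get(geneMarker, 0) | bit'
def altAddHalf (d : PySem.Dict String Int) (half : List (String × (Int × Int))) (bit : Int) : PySem.Dict String Int :=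
  half.foldl (fun d p => d.insert p.1 (PySem.Int.bor (d.getD p.1 0) bit)) d

-- body of Source B's tally loop over flags.values()
def altUpd (c : Int × Int × Int × Int) (f : Int) : Int × Int × Int × Int :=
  let c :=
    if PySem.Int.band f 1 ≠ 0 then
      let c := if PySem.Int.band f 4 ≠ 0 then (c.1 + 1, c.2.1, c.2.2.1, c.2.2.2) else c
      if PySem.Int.band f 8 ≠ 0 then (c.1, c.2.1 + 1, c.2.2.1, c.2.2.2) else c
    else c
  if PySem.Int.band f 2 ≠ 0 then
    let c := if PySem.Int.band f 4 ≠ 0 then (c.1, c.2.1, c.2.2.1 + 1, c.2.2.2) else c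
    if PySem.Int.band f 8 ≠ 0 then (c.1, c.2.1, c.2.2.1, c.2.2.2 + 1) else c
  else c

def matchReplichores_alt (ref : List (List (String × (Int × Int)))) (test : List (List (String × (Int × Int)))) : List Int :=
  match PySem.List.pyGet? ref 0 with
  | none => []   -- unreachable under Pre_ (Python raises IndexError)
  | some ref0 =>
    match PySem.List.pyGet? ref 1 with
    | none => []
    | some ref1 =>
      match PySem.List.pyGet? test 0 with
      | none => []
      | some test0 =>
        match PySem.List.pyGet? test 1 with
        | none => []
        | some test1 =>
          let flags := [(ref0, (1 : Int)), (ref1, 2), (test0, 4), (test1, 8)].foldl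
            (fun d hb => altAddHalf d hb.1 hb.2) PySem.Dict.empty
          let c := flags.values.foldl altUpd (0, 0, 0, 0)
          [c.1, c.2.1, c.2.2.1, c.2.2.2]

-- ===== PRECONDITION & SPEC =====
-- Pre_ excludes exactly the inputs on which A raises IndexError: ref/test with fewer than two halves.
def Pre_matchReplichores (ref : List (List (String × (Int × Int)))) (test : List (List (String × (Int × Int)))) : Prop :=
  2 ≤ ref.length ∧ 2 ≤ test.length
instance (ref : List (List (String × (Int × Int)))) (test : List (List (String × (Int × Int)))) : Decidable (Pre_matchReplichores ref test) := by unfold Pre_matchReplichores; infer_instance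

def pvWitness_matchReplichores : (List (List (String × (Int × Int)))) × (List (List (String × (Int × Int)))) :=
  ([[("a", (0, 5)), ("b", (5, 9))], [("c", (9, 12))]], [[("a", (0, 4))], [("b", (4, 9)), ("c", (9, 12))]])

def Spec_matchReplichores (ref : List (List (String × (Int × Int)))) (test : List (List (String × (Int × Int)))) (out : List Int) : Prop := out = matchReplichores_alt ref test
instance (ref : List (List (String × (Int × Int)))) (test : List (List (String × (Int × Int)))) (out : List Int) : Decidable (Spec_matchReplichores ref test out) := by unfold Spec_matchReplichores; infer_instance

-- ===== CLAIM (what is proved, stated in full; the proofs are below) =====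
def Claim_equal_matchReplichores : Prop := ∀ (ref : List (List (String × (Int × Int)))) (test : List (List (String × (Int × Int)))), Dom_matchReplichores ref test → Pre_matchReplichores ref test → Spec_matchReplichores ref test (matchReplichores ref test)

-- ===== LEMMAS AND PROOFS =====

-- the four tally predicates of Source B's value loop
def pLL (f : Int) : Bool := decide (PySem.Int.band f 1 ≠ 0) && decide (PySem.Int.band f 4 ≠ 0)
def pLR (f : Int) : Bool := decide (PySem.Int.band f 1 ≠ 0) && decide (PySem.Int.band f 8 ≠ 0)
def pRL (f : Int) : Bool := decide (PySem.Int.band f 2 ≠ 0) && decide (PySem.Int.band f 4 ≠ 0)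
def pRR (f : Int) : Bool := decide (PySem.Int.band f 2 ≠ 0) && decide (PySem.Int.band f 8 ≠ 0)

-- the bitmask a marker ends with, as a function of which halves contain it
def Mask (b0 b1 b2 b3 : Bool) : Int :=
  let g1 : Int := if b0 then PySem.Int.bor 0 1 else 0
  let g2 := if b1 then PySem.Int.bor g1 2 else g1
  let g3 := if b2 then PySem.Int.bor g2 4 else g2
  if b3 then PySem.Int.bor g3 8 else g3

lemma bor_nonneg (a b : Int) (ha : 0 ≤ a) (hb : 0 ≤ b) : 0 ≤ PySem.Int.bor a b := by
  lift a to ℕ using ha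
  lift b to ℕ using hb
  rw [PySem.Int.bor_natCast]
  positivity

lemma bor_bor_self (a b : Int) (ha : 0 ≤ a) (hb : 0 ≤ b) :
    PySem.Int.bor (PySem.Int.bor a b) b = PySem.Int.bor a b := by
  lift a to ℕ using ha
  lift b to ℕ using hb
  rw [PySem.Int.bor_natCast, PySem.Int.bor_natCast, Nat.lor_assoc, Nat.or_self]

lemma stepGetD (half : List (String × (Int × Int))) (bit : Int) (hbit : 0 ≤ bit)
    (d : PySem.Dict String Int) (hd : ∀ k, 0 ≤ d.getD k 0) (k : String) :
    (altAddHalf d half bit).getD k 0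
      = if k ∈ half.map Prod.fst then PySem.Int.bor (d.getD k 0) bit else d.getD k 0 := by
  induction half generalizing d with
  | nil => simp [altAddHalf]
  | cons p t ih =>
    have hd' : ∀ k', 0 ≤ (d.insert p.1 (PySem.Int.bor (d.getD p.1 0) bit)).getD k' 0 := by
      intro k'
      rw [PySem.Dict.getD_insert]
      split
      · exact bor_nonneg _ _ (hd _) hbit
      · exact hd _
    show (altAddHalf (d.insert p.1 (PySem.Int.bor (d.getD p.1 0) bit)) t bit).getD k 0 = _
    rw [ih _ hd', PySem.Dict.getD_insert]
    by_cases h1 : k = p.1 <;> by_cases h2 : k ∈ t.map Prod.fst <;>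
      simp [h1, h2, bor_bor_self _ _ (hd _) hbit]

lemma stepGetD_nonneg (half : List (String × (Int × Int))) (bit : Int) (hbit : 0 ≤ bit)
    (d : PySem.Dict String Int) (hd : ∀ k, 0 ≤ d.getD k 0) (k : String) :
    0 ≤ (altAddHalf d half bit).getD k 0 := by
  rw [stepGetD half bit hbit d hd k]
  split
  · exact bor_nonneg _ _ (hd _) hbit
  · exact hd _

lemma altUpd_eq (c : Int × Int × Int × Int) (f : Int) :
    altUpd c f = (c.1 + (if pLL f then 1 else 0), c.2.1 + (if pLR f then 1 else 0),
                  c.2.2.1 + (if pRL f then 1 else 0), c.2.2.2 + (if pRR f then 1 else 0)) := by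
  unfold altUpd pLL pLR pRL pRR
  by_cases h1 : PySem.Int.band f 1 ≠ 0 <;> by_cases h2 : PySem.Int.band f 2 ≠ 0 <;>
    by_cases h4 : PySem.Int.band f 4 ≠ 0 <;> by_cases h8 : PySem.Int.band f 8 ≠ 0 <;>
      simp [h1, h2, h4, h8]

lemma altFold (l : List Int) (a b c d : Int) :
    l.foldl altUpd (a, b, c, d)
      = (a + l.countP pLL, b + l.countP pLR, c + l.countP pRL, d + l.countP pRR) := by
  induction l generalizing a b c d with
  | nil => simp
  | cons f t ih =>
    rw [List.foldl_cons, altUpd_eq, ih]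
    cases h1 : pLL f <;> cases h2 : pLR f <;> cases h3 : pRL f <;> cases h4 : pRR f <;>
      simp [h1, h2, h3, h4, Prod.mk.injEq] <;> omega

lemma pLL_mask (b0 b1 b2 b3 : Bool) : pLL (Mask b0 b1 b2 b3) = (b0 && b2) := by
  cases b0 <;> cases b1 <;> cases b2 <;> cases b3 <;> decide

lemma pLR_mask (b0 b1 b2 b3 : Bool) : pLR (Mask b0 b1 b2 b3) = (b0 && b3) := by
  cases b0 <;> cases b1 <;> cases b2 <;> cases b3 <;> decide

lemma pRL_mask (b0 b1 b2 b3 : Bool) : pRL (Mask b0 b1 b2 b3) = (b1 && b2) := by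
  cases b0 <;> cases b1 <;> cases b2 <;> cases b3 <;> decide

lemma pRR_mask (b0 b1 b2 b3 : Bool) : pRR (Mask b0 b1 b2 b3) = (b1 && b3) := by
  cases b0 <;> cases b1 <;> cases b2 <;> cases b3 <;> decide

-- counting the distinct markers in u ∩ v on the merged index equals A's |set(u) ∩ set(v)|
lemma count_pair (u v big : List String) (hu : ∀ x ∈ u, x ∈ big) :
    ((PySem.Set.ofList big).countP (fun k => decide (k ∈ u) && decide (k ∈ v)) : Int)
      = PySem.Set.len (PySem.Set.inter (PySem.Set.ofList u) (PySem.Set.ofList v)) := by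
  have hcontains : ∀ x : String, PySem.Set.contains (PySem.Set.ofList v) x = decide (x ∈ v) := by
    intro x
    simp [PySem.Set.contains, PySem.Set.mem_ofList]
  have hperm : ((PySem.Set.ofList big).filter (fun k => decide (k ∈ u) && decide (k ∈ v))).Perm
      ((PySem.Set.ofList u).filter (fun k => decide (k ∈ v))) := by
    rw [List.perm_ext_iff_of_nodup ((PySem.Set.nodup_ofList big).filter _)
      ((PySem.Set.nodup_ofList u).filter _)]
    intro x
    simp only [List.mem_filter, PySem.Set.mem_ofList, Bool.and_eq_true, decide_eq_true_eq]
    constructor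
    · rintro ⟨_, hxu, hxv⟩; exact ⟨hxu, hxv⟩
    · rintro ⟨hxu, hxv⟩; exact ⟨hu x hxu, hxu, hxv⟩
  have : PySem.Set.inter (PySem.Set.ofList u) (PySem.Set.ofList v)
      = (PySem.Set.ofList u).filter (fun k => decide (k ∈ v)) := by
    show List.filter _ _ = _
    exact List.filter_congr (fun x _ => hcontains x)
  rw [this, PySem.Set.len, List.countP_eq_length_filter, hperm.length_eq]

lemma pyGet?_cons_zero {α : Type} (x : α) (t : List α) :
    PySem.List.pyGet? (x :: t) 0 = some x := by
  simp [PySem.List.pyGet?, PySem.List.pyIdx?]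

lemma pyGet?_cons_cons_one {α : Type} (x y : α) (t : List α) :
    PySem.List.pyGet? (x :: y :: t) 1 = some y := by
  simp [PySem.List.pyGet?, PySem.List.pyIdx?]

-- ===== VERDICT (by name: the statement is the Claim_ definition above) =====
theorem matchReplichores_spec : Claim_equal_matchReplichores := by
  intro ref test _hdom hpre
  unfold Spec_matchReplichores
  obtain ⟨hr, ht⟩ := hpre
  match ref, hr with
  | ref0 :: ref1 :: refrest, _ =>
  match test, ht with
  | test0 :: test1 :: testrest, _ =>
  -- reduce both matches
  rw [matchReplichores, matchReplichores_alt]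
  rw [pyGet?_cons_zero, pyGet?_cons_cons_one, pyGet?_cons_zero, pyGet?_cons_cons_one]
  simp only [List.foldl_cons, List.foldl_nil]
  set m0 := ref0.map (fun p : String × (Int × Int) => p.1) with hm0
  set m1 := ref1.map (fun p : String × (Int × Int) => p.1) with hm1
  set m2 := test0.map (fun p : String × (Int × Int) => p.1) with hm2
  set m3 := test1.map (fun p : String × (Int × Int) => p.1) with hm3
  set D4 := altAddHalf (altAddHalf (altAddHalf (altAddHalf PySem.Dict.empty ref0 1) ref1 2) test0 4) test1 8 with hD4
  -- nonnegativity chain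
  have h0 : ∀ k, 0 ≤ (PySem.Dict.empty : PySem.Dict String Int).getD k 0 := by
    intro k; rw [PySem.Dict.getD_empty]
  have h1 := stepGetD_nonneg ref0 1 (by norm_num) _ h0
  have h2 := stepGetD_nonneg ref1 2 (by norm_num) _ h1
  have h3 := stepGetD_nonneg test0 4 (by norm_num) _ h2
  -- the dict's final value at any key is the membership bitmask
  have hmask : ∀ k, D4.getD k 0
      = Mask (decide (k ∈ m0)) (decide (k ∈ m1)) (decide (k ∈ m2)) (decide (k ∈ m3)) := by
    intro k
    rw [hD4, stepGetD test1 8 (by norm_num) _ h3, stepGetD test0 4 (by norm_num) _ h2,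
      stepGetD ref1 2 (by norm_num) _ h1, stepGetD ref0 1 (by norm_num) _ h0,
      PySem.Dict.getD_empty]
    simp only [Mask, decide_eq_true_eq]
    rfl
  -- keys of the dict: distinct markers of the four halves, in order
  have hkeys : D4.keys = PySem.Set.ofList (m0 ++ m1 ++ m2 ++ m3) := by
    rw [hD4]
    simp only [altAddHalf]
    rw [PySem.Dict.keys_foldl_insert_key, PySem.Dict.keys_foldl_insert_key,
        PySem.Dict.keys_foldl_insert_key, PySem.Dict.keys_foldl_insert_key,
        PySem.Dict.keys_empty, PySem.Set.ofList_eq_foldl]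
    simp [PySem.Set.update, List.foldl_append]
    rfl
  have hnodup : D4.keys.Nodup := by
    rw [hkeys]; exact PySem.Set.nodup_ofList _
  -- values → countP over keys
  have hvals : D4.values = D4.keys.map (fun k => D4.getD k 0) :=
    PySem.Dict.values_eq_map_keys D4 hnodup 0
  rw [hvals, altFold]
  simp only [List.countP_map]
  -- rewrite each countP through the mask characterisation
  have key_count : ∀ (p : Int → Bool) (q : String → Bool),
      (∀ k, p (D4.getD k 0) = q k) →
      D4.keys.countP ((fun f => p f) ∘ fun k => D4.getD k 0) = D4.keys.countP q := by
    intro p q h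
    exact List.countP_congr (fun x _ => by simp [Function.comp, h x])
  have sub0 : ∀ x ∈ m0, x ∈ m0 ++ m1 ++ m2 ++ m3 := by intro x hx; simp [hx]
  have sub1 : ∀ x ∈ m1, x ∈ m0 ++ m1 ++ m2 ++ m3 := by intro x hx; simp [hx]
  have cLL : D4.keys.countP (pLL ∘ fun k => D4.getD k 0)
      = (PySem.Set.ofList (m0 ++ m1 ++ m2 ++ m3)).countP (fun k => decide (k ∈ m0) && decide (k ∈ m2)) := by
    rw [key_count pLL _ (fun k => by rw [hmask k, pLL_mask])]
    rw [hkeys]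
  have cLR : D4.keys.countP (pLR ∘ fun k => D4.getD k 0)
      = (PySem.Set.ofList (m0 ++ m1 ++ m2 ++ m3)).countP (fun k => decide (k ∈ m0) && decide (k ∈ m3)) := by
    rw [key_count pLR _ (fun k => by rw [hmask k, pLR_mask])]
    rw [hkeys]
  have cRL : D4.keys.countP (pRL ∘ fun k => D4.getD k 0)
      = (PySem.Set.ofList (m0 ++ m1 ++ m2 ++ m3)).countP (fun k => decide (k ∈ m1) && decide (k ∈ m2)) := by
    rw [key_count pRL _ (fun k => by rw [hmask k, pRL_mask])]
    rw [hkeys]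
  have cRR : D4.keys.countP (pRR ∘ fun k => D4.getD k 0)
      = (PySem.Set.ofList (m0 ++ m1 ++ m2 ++ m3)).countP (fun k => decide (k ∈ m1) && decide (k ∈ m3)) := by
    rw [key_count pRR _ (fun k => by rw [hmask k, pRR_mask])]
    rw [hkeys]
  rw [cLL, cLR, cRL, cRR]
  simp only [List.cons.injEq, and_true]
  refine ⟨?_, ?_, ?_, ?_⟩
  · rw [← count_pair m0 m2 _ sub0]; ring
  · rw [← count_pair m0 m3 _ sub0]; ring
  · rw [← count_pair m1 m2 _ sub1]; ring
  · rw [← count_pair m1 m3 _ sub1]; ring
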